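-- pv_equiv track=rewrite | github.com/dvanael/pc-atividades | lista-06/j-lista-sem-menor.py | sublista_sem_menor
-- ===== SOURCE A (Python) =====
-- def sublista_sem_menor(lista):
--     x = lista[0]
--     counter = 0
--     for index, item in enumerate(lista):
--         if x > item:
--             counter = index
--             x = item
--     copia = lista.copy()
--     copia.pop(counter)
--     return copia
-- ===== SOURCE B (Python) =====
-- def sublista_sem_menor(lista):
--     # One forward pass that builds the output directly: `pre` holds the elements
--     # before the current (first) minimum, `post` the elements after it.  When a new
--     # strict minimum appears, the old minimum and everything after it fall into `pre`.
--     m = lista[0]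
--     pre, post = [], []
--     for item in lista[1:]:
--         if item < m:
--             pre.append(m)
--             pre.extend(post)
--             post = []
--             m = item
--         else:
--             post.append(item)
--     return pre + post
-- ===== Notes on version B (the rewrite author's own statement) =====
-- stated objective: alternative
-- what changed: Instead of A's find-the-min-index-then-copy-and-pop, B never computes an index at all: a single pass maintains the output itself as two accumulators (elements before / after the current first minimum) that are restructured whenever a new strict minimum appears, and returns their concatenation.
import Mathlib
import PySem

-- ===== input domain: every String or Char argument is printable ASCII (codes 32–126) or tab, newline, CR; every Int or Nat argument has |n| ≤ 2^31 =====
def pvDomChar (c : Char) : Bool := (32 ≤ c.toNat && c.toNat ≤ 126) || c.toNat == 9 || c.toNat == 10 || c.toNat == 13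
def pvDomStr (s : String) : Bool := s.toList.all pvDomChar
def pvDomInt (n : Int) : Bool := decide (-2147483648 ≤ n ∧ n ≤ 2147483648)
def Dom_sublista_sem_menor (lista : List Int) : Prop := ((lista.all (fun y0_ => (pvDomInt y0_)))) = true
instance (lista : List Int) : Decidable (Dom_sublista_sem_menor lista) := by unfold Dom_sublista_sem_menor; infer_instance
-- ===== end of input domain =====

-- B removes the first occurrence of the minimum without ever computing an index: a single
-- pass keeps the output as two accumulators (before/after the current first minimum) and
-- restructures them when a new strict minimum appears (objective: alternative).

-- ===== PORT A =====
def sublista_sem_menor (lista : List Int) : List Int :=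
  match PySem.List.pyGet? lista 0 with
  | none => []      -- lista[0] raises IndexError on the empty list; excluded by Pre_
  | some x0 =>
    let r := (PySem.List.enumerate lista 0).foldl
      (fun (s : Int × Int) (p : Int × Int) => if p.2 < s.1 then (p.2, p.1) else s) (x0, 0)
    match PySem.List.pop? lista r.2 with
    | none => []    -- unreachable for a nonempty list
    | some q => q.2

-- ===== PORT B =====
-- state = (m, pre, post): current minimum, elements before it, elements after it
def sublista_sem_menor_alt (lista : List Int) : List Int :=
  match lista with
  | [] => []        -- lista[0] raises IndexError on the empty list; excluded by Pre_
  | h :: t =>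
    let s := t.foldl
      (fun (s : Int × List Int × List Int) item =>
        if item < s.1 then (item, s.2.1 ++ [s.1] ++ s.2.2, [])
        else (s.1, s.2.1, s.2.2 ++ [item])) (h, [], [])
    s.2.1 ++ s.2.2

-- ===== PRECONDITION & SPEC =====
-- A raises IndexError on the empty list (lista[0]); Pre_ excludes exactly it.
def Pre_sublista_sem_menor (lista : List Int) : Prop := lista ≠ []
instance (lista : List Int) : Decidable (Pre_sublista_sem_menor lista) := by
  unfold Pre_sublista_sem_menor; infer_instance

def pvWitness_sublista_sem_menor : List Int := [3, 1, 4, 1, 5]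

def Spec_sublista_sem_menor (lista : List Int) (out : List Int) : Prop := out = sublista_sem_menor_alt lista
instance (lista : List Int) (out : List Int) : Decidable (Spec_sublista_sem_menor lista out) := by unfold Spec_sublista_sem_menor; infer_instance

-- ===== CLAIM (what is proved, stated in full; the proofs are below) =====
def Claim_equal_sublista_sem_menor : Prop := ∀ (lista : List Int), Dom_sublista_sem_menor lista → Pre_sublista_sem_menor lista → Spec_sublista_sem_menor lista (sublista_sem_menor lista)

-- ===== LEMMAS AND PROOFS =====

-- Characterisation of A's fused loop over the enumerated tail.
theorem fold_spec (xs : List Int) (x c k : Int) :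
    ((PySem.List.enumerate xs k).foldl
      (fun (s : Int × Int) (p : Int × Int) => if p.2 < s.1 then (p.2, p.1) else s) (x, c)).1
      = xs.foldl min x ∧
    ((((PySem.List.enumerate xs k).foldl
      (fun (s : Int × Int) (p : Int × Int) => if p.2 < s.1 then (p.2, p.1) else s) (x, c)) = (x, c)) ∨
     (xs.foldl min x < x ∧ ∃ j : Nat, ∃ hj : j < xs.length,
        ((PySem.List.enumerate xs k).foldl
          (fun (s : Int × Int) (p : Int × Int) => if p.2 < s.1 then (p.2, p.1) else s) (x, c)).2 = k + j ∧
        xs[j] = xs.foldl min x ∧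
        ∀ i, (hi : i < j) → xs.foldl min x < xs[i]'(Nat.lt_trans hi hj))) := by
  induction xs generalizing x c k with
  | nil => simp [PySem.List.enumerate]
  | cons a t ih =>
    rw [PySem.List.enumerate_cons]
    simp only [List.foldl_cons]
    by_cases hxa : a < x
    · simp only [hxa, if_pos]
      obtain ⟨h1, h2⟩ := ih a k (k + 1)
      have hmin : min x a = a := by omega
      refine ⟨by simpa [hmin] using h1, ?_⟩
      rcases h2 with heq | ⟨hlt, j, hj, hr2, hget, hpre⟩
      · have h1' : a = t.foldl min a := by rw [heq] at h1; simpa using h1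
        right
        refine ⟨?_, 0, by simp, ?_, ?_, ?_⟩
        · simp only [hmin]; omega
        · rw [heq]; simp
        · simp only [List.getElem_cons_zero, hmin]; exact h1'
        · intro i hi; omega
      · right
        refine ⟨?_, j + 1, by simp only [List.length_cons]; omega, ?_, ?_, ?_⟩
        · simp only [hmin]; omega
        · rw [hr2]; push_cast; ring
        · simpa [hmin] using hget
        · intro i hi
          match i with
          | 0 => simp only [List.getElem_cons_zero, hmin]; omega
          | Nat.succ i' =>
            simp only [List.getElem_cons_succ, hmin]
            exact hpre i' (by omega)
    · simp only [hxa, if_neg, not_false_eq_true]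
      obtain ⟨h1, h2⟩ := ih x c (k + 1)
      have hmin : min x a = x := by omega
      refine ⟨by simpa [hmin] using h1, ?_⟩
      rcases h2 with heq | ⟨hlt, j, hj, hr2, hget, hpre⟩
      · left; exact heq
      · right
        refine ⟨?_, j + 1, by simp only [List.length_cons]; omega, ?_, ?_, ?_⟩
        · simp only [hmin]; omega
        · rw [hr2]; push_cast; ring
        · simpa [hmin] using hget
        · intro i hi
          match i with
          | 0 => simp only [List.getElem_cons_zero, hmin]; omega
          | Nat.succ i' =>
            simp only [List.getElem_cons_succ, hmin]
            exact hpre i' (by omega)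

-- Invariant of B's single pass, stated for an arbitrary starting state.
theorem foldB_spec (u : List Int) (m : Int) (pre post : List Int)
    (hpre : ∀ x ∈ pre, m < x) (hpost : ∀ x ∈ post, m ≤ x) :
    let s := u.foldl
      (fun (s : Int × List Int × List Int) item =>
        if item < s.1 then (item, s.2.1 ++ [s.1] ++ s.2.2, [])
        else (s.1, s.2.1, s.2.2 ++ [item])) (m, pre, post)
    s.1 = u.foldl min m ∧
    s.2.1 ++ s.1 :: s.2.2 = (pre ++ m :: post) ++ u ∧
    (∀ x ∈ s.2.1, s.1 < x) ∧ (∀ x ∈ s.2.2, s.1 ≤ x) := by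
  induction u generalizing m pre post with
  | nil => exact ⟨by simp, by simp, hpre, hpost⟩
  | cons a u ih =>
    simp only [List.foldl_cons]
    by_cases ham : a < m
    · simp only [ham, if_pos]
      have hpre' : ∀ x ∈ pre ++ [m] ++ post, a < x := by
        intro x hx
        simp only [List.mem_append, List.mem_singleton] at hx
        rcases hx with (hx | rfl) | hx
        · exact lt_trans ham (hpre x hx)
        · exact ham
        · exact lt_of_lt_of_le ham (hpost x hx)
      obtain ⟨h1, h2, h3, h4⟩ := ih a (pre ++ [m] ++ post) [] hpre' (by simp)
      refine ⟨by simpa [min_eq_right (le_of_lt ham)] using h1, ?_, h3, h4⟩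
      rw [h2]
      simp
    · simp only [ham, if_neg, not_false_eq_true]
      have ham' : m ≤ a := by omega
      obtain ⟨h1, h2, h3, h4⟩ := ih m pre (post ++ [a]) hpre
        (by intro x hx; simp only [List.mem_append, List.mem_singleton] at hx
            rcases hx with hx | rfl; exacts [hpost x hx, ham'])
      refine ⟨by simpa [min_eq_left ham'] using h1, ?_, h3, h4⟩
      rw [h2]
      simp

-- First occurrence of the minimum is unique: a decomposition p ++ m :: s with everything
-- in p strictly above m pins the index down.
theorem first_min_unique (m : Int) (p s : List Int) (hp : ∀ x ∈ p, m < x)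
    (k : Nat) (hk : k < (p ++ m :: s).length)
    (hkm : (p ++ m :: s)[k] = m)
    (hbefore : ∀ i, (hi : i < k) → m < (p ++ m :: s)[i]'(Nat.lt_trans hi hk)) :
    p.length = k := by
  rcases lt_trichotomy p.length k with h | h | h
  · have hlen : p.length < (p ++ m :: s).length := by simp
    have : (p ++ m :: s)[p.length] = m := by
      rw [List.getElem_append_right (le_refl p.length)]
      simp
    have := hbefore p.length h
    omega
  · exact h
  · have he : (p ++ m :: s)[k] = p[k]'h := List.getElem_append_left h
    have hm := hp (p[k]'h) (List.getElem_mem h)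
    rw [he] at hkm
    omega

theorem eraseIdx_append_cons (p : List Int) (m : Int) (s : List Int) :
    (p ++ m :: s).eraseIdx p.length = p ++ s := by
  induction p with
  | nil => simp
  | cons x p ih => simpa [List.eraseIdx_cons_succ] using ih

-- ===== VERDICT (by name: the statement is the Claim_ definition above) =====
theorem sublista_sem_menor_spec : Claim_equal_sublista_sem_menor := by
  intro lista _ hpre
  unfold Spec_sublista_sem_menor
  match lista with
  | [] => exact absurd rfl hpre
  | h :: t =>
    -- A unfolded: the result is pop at the fold's counter over the tail
    have hA : sublista_sem_menor (h :: t) =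
        match PySem.List.pop? (h :: t) ((PySem.List.enumerate t 1).foldl
          (fun (s : Int × Int) (p : Int × Int) => if p.2 < s.1 then (p.2, p.1) else s) (h, 0)).2 with
        | none => []
        | some q => q.2 := by
      unfold sublista_sem_menor
      rw [show (0 : Int) = ((0 : Nat) : Int) by norm_num, PySem.List.pyGet?_natCast]
      simp only [List.getElem?_cons_zero]
      rw [PySem.List.enumerate_cons]
      simp only [List.foldl_cons, ite_self]
      norm_num
    -- B's invariant
    obtain ⟨b1, b2, b3, b4⟩ := foldB_spec t h [] [] (by simp) (by simp)
    set sB := t.foldl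
      (fun (s : Int × List Int × List Int) item =>
        if item < s.1 then (item, s.2.1 ++ [s.1] ++ s.2.2, [])
        else (s.1, s.2.1, s.2.2 ++ [item])) (h, [], []) with hsB
    have hBval : sublista_sem_menor_alt (h :: t) = sB.2.1 ++ sB.2.2 := rfl
    simp only [List.nil_append, List.singleton_append] at b2
    obtain ⟨a1, a2⟩ := fold_spec t h 0 1
    rcases a2 with heq | ⟨hlt, j, hj, hr2, hget, hpre2⟩
    · -- minimum is the head: counter = 0, A returns t
      have hm : t.foldl min h = h := by rw [heq] at a1; simpa using a1.symm
      rw [hA, heq]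
      simp only
      rw [PySem.List.pop?_zero_cons]
      -- B: pre must be empty, since all of pre is strictly above the minimum h
      have hpre0 : sB.2.1 = [] := by
        cases hp : sB.2.1 with
        | nil => rfl
        | cons y p' =>
          have hy : sB.1 < y := b3 y (by rw [hp]; exact List.mem_cons_self)
          have : y = h := by
            have := b2
            rw [hp] at this
            exact (List.cons_eq_cons.mp this).1
          rw [b1, hm, this] at hy
          omega
      have hpost : sB.2.2 = t := by
        have := b2
        rw [hpre0, List.nil_append, List.cons_eq_cons] at this
        exact this.2
      rw [hBval, hpre0, hpost, List.nil_append]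
    · -- minimum first occurs inside the tail at tail index j: counter = j + 1
      rw [hA, hr2, show (1 : Int) + (j : Int) = ((j + 1 : Nat) : Int) by push_cast; ring]
      have hlen : j + 1 < (h :: t).length := by simp only [List.length_cons]; omega
      rw [PySem.List.pop?_natCast _ _ hlen]
      simp only
      -- B: the output is pre ++ post, and pre.length = j + 1 by uniqueness
      have hm : sB.1 = t.foldl min h := b1
      have hb2 : sB.2.1 ++ sB.1 :: sB.2.2 = h :: t := b2
      have hk : j + 1 < (sB.2.1 ++ sB.1 :: sB.2.2).length := by rw [hb2]; exact hlen
      have hkm : (sB.2.1 ++ sB.1 :: sB.2.2)[j + 1]'hk = sB.1 := by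
        have : (sB.2.1 ++ sB.1 :: sB.2.2)[j + 1]'hk = (h :: t)[j + 1]'hlen := by
          simp only [hb2]
        rw [this]
        simp only [List.getElem_cons_succ]
        rw [hget, hm]
      have hbefore : ∀ i, (hi : i < j + 1) → sB.1 < (sB.2.1 ++ sB.1 :: sB.2.2)[i]'(Nat.lt_trans hi hk) := by
        intro i hi
        have hi' : i < (h :: t).length := Nat.lt_trans hi hlen
        have he : (sB.2.1 ++ sB.1 :: sB.2.2)[i]'(Nat.lt_trans hi hk) = (h :: t)[i]'hi' := by
          simp only [hb2]
        rw [he, hm]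
        match i with
        | 0 => simpa using hlt
        | Nat.succ i' => simpa using hpre2 i' (by omega)
      have hplen : sB.2.1.length = j + 1 :=
        first_min_unique sB.1 sB.2.1 sB.2.2 b3 (j + 1) hk hkm hbefore
      have herase : (h :: t).eraseIdx (j + 1) = sB.2.1 ++ sB.2.2 := by
        rw [← hb2, ← hplen, eraseIdx_append_cons]
      rw [herase, hBval]
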